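-- pv_equiv track=rewrite | github.com/s1341/shade | dlmalloc-vis.py | compute_tree_index
-- ===== SOURCE A (Python) =====
-- def rshift(val, n):
--     return (val % 0x100000000) >> n
--
-- NTREEBINS = 32
--
-- TREEBIN_SHIFT = 8
--
-- def compute_tree_index(size):
--     X = rshift(size, TREEBIN_SHIFT)
--     if X == 0:
--         return 0
--     elif X > 0xffff:
--         return NTREEBINS - 1
--     else:
--         n = X
--         for i in range(31, 0, -1):
--             if n & (1 << i):
--                 break
--
--         return (i << 1) + (size >> (i + (TREEBIN_SHIFT - 1)) & 1)
-- ===== SOURCE B (Python) =====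
-- NTREEBINS = 32
--
-- TREEBIN_SHIFT = 8
--
-- def _high_bit(n):
--     # binary-search halving for floor(log2(n)); n fits in 16 bits here
--     i = 0
--     if n >= 1 << 8:
--         n >>= 8
--         i += 8
--     if n >= 1 << 4:
--         n >>= 4
--         i += 4
--     if n >= 1 << 2:
--         n >>= 2
--         i += 2
--     if n >= 2:
--         i += 1
--     return i
--
-- def compute_tree_index(size):
--     X = (size % 0x100000000) >> TREEBIN_SHIFT
--     if X == 0:
--         return 0
--     if X > 0xffff:
--         return NTREEBINS - 1
--     i = _high_bit(X)
--     return (i << 1) + ((size >> (i + TREEBIN_SHIFT - 1)) & 1)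
-- ===== Notes on version B (the rewrite author's own statement) =====
-- stated objective: alternative
-- what changed: Replaced A's 31-step descending bit-scan loop by a branch-based binary search (shift by 8/4/2/1) for the highest set bit, the technique real dlmalloc uses; it naturally yields index 0 for X==1 instead of A's stale loop value 1.
-- intended difference: On sizes with (size % 2**32) >> 8 == 1 (i.e. size mod 2**32 in [256,512)), A returns 2+((size>>8)&1) because the for-loop never tests bit 0 and leaves i at its stale final value 1, while B returns (size>>7)&1, the correct tree index for highest bit 0 as real dlmalloc computes it. — e.g. on compute_tree_index(256): A returns 3, B returns 0
import Mathlib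
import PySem

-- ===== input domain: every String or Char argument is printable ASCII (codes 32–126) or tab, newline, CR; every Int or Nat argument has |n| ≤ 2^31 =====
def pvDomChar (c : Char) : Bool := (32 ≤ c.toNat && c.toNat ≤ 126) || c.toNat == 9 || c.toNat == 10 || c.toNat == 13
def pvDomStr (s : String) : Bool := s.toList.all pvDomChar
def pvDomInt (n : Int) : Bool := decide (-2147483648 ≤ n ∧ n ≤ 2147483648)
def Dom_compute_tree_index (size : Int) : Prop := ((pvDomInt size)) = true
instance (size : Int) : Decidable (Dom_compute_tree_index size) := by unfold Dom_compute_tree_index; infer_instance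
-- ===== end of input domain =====

-- B finds the highest set bit by a 4-step binary search (shift by 8/4/2/1) instead of A's
-- descending 31-step bit-scan loop; it returns the correct index for X == 1 where A's loop
-- leaves its stale final value (objective: alternative; see D_ below).

-- ===== PORT A =====
-- rshift(val, n): Python '%' = PySem.Int.mod, '>>' on a nonneg Int = Lean '>>>' (Python-exact)
def rshift (val : Int) (n : Nat) : Int := (PySem.Int.mod val 0x100000000) >>> n

-- the loop 'for i in range(31, 0, -1): if n & (1 << i): break' — checks i = c, c-1, …, 1;
-- if no bit fires, Python leaves i at the last value 1, hence the base case.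
def pvScan (n : Int) : Nat → Int
  | 0 => 1
  | c + 1 => if PySem.Int.band n ((1 : Int) <<< (c + 1)) ≠ 0 then ((c + 1 : Nat) : Int) else pvScan n c

def compute_tree_index (size : Int) : Int :=
  let X := rshift size 8
  if X = 0 then 0
  else if X > 0xffff then 32 - 1
  else
    let i := pvScan X 31
    (i <<< 1) + PySem.Int.band (size >>> (i + (8 - 1)).toNat) 1

-- ===== PORT B =====
-- _high_bit(n): each Python 'if n >= 1 << s: n >>= s; i += s' becomes a pair of lets over the same state
def pvHighBit (n : Int) : Int :=
  let n1 := if n ≥ (1 : Int) <<< (8 : Nat) then n >>> (8 : Nat) else n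
  let i1 : Int := if n ≥ (1 : Int) <<< (8 : Nat) then 0 + 8 else 0
  let n2 := if n1 ≥ (1 : Int) <<< (4 : Nat) then n1 >>> (4 : Nat) else n1
  let i2 := if n1 ≥ (1 : Int) <<< (4 : Nat) then i1 + 4 else i1
  let n3 := if n2 ≥ (1 : Int) <<< (2 : Nat) then n2 >>> (2 : Nat) else n2
  let i3 := if n2 ≥ (1 : Int) <<< (2 : Nat) then i2 + 2 else i2
  if n3 ≥ 2 then i3 + 1 else i3

def compute_tree_index_alt (size : Int) : Int :=
  let X := (PySem.Int.mod size 0x100000000) >>> (8 : Nat)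
  if X = 0 then 0
  else if X > 0xffff then 32 - 1
  else
    let i := pvHighBit X
    (i <<< 1) + PySem.Int.band (size >>> (i + 8 - 1).toNat) 1

-- ===== PRECONDITION & SPEC =====
-- On sizes with (size % 2^32) >> 8 == 1, A's for-loop never tests bit 0 and leaves i at its stale
-- final value 1, so A returns 2+((size>>8)&1), while B returns (size>>7)&1, the correct tree index
-- for highest bit 0 as real dlmalloc computes it.
def D_compute_tree_index (size : Int) : Prop := 256 ≤ PySem.Int.mod size 0x100000000 ∧ PySem.Int.mod size 0x100000000 < 512
instance (size : Int) : Decidable (D_compute_tree_index size) := by unfold D_compute_tree_index; infer_instance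

def Spec_compute_tree_index (size : Int) (out : Int) : Prop := ¬ D_compute_tree_index size → out = compute_tree_index_alt size
instance (size : Int) (out : Int) : Decidable (Spec_compute_tree_index size out) := by unfold Spec_compute_tree_index; infer_instance

def pvDiffWitness_compute_tree_index : Int := 256
def pvDiffWitnessOut_compute_tree_index : Int × Int := (3, 0)

-- ===== CLAIM (what is proved, stated in full; the proofs are below) =====
def Claim_unchanged_compute_tree_index : Prop := ∀ (size : Int), Dom_compute_tree_index size → Spec_compute_tree_index size (compute_tree_index size)
def Claim_changed_compute_tree_index : Prop := Dom_compute_tree_index (pvDiffWitness_compute_tree_index) ∧ D_compute_tree_index (pvDiffWitness_compute_tree_index) ∧ compute_tree_index (pvDiffWitness_compute_tree_index) = pvDiffWitnessOut_compute_tree_index.1 ∧ compute_tree_index_alt (pvDiffWitness_compute_tree_index) = pvDiffWitnessOut_compute_tree_index.2 ∧ pvDiffWitnessOut_compute_tree_index.1 ≠ pvDiffWitnessOut_compute_tree_index.2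
def Claim_exact_compute_tree_index : Prop := ∀ (size : Int), Dom_compute_tree_index size → D_compute_tree_index size → compute_tree_index size ≠ compute_tree_index_alt size

-- ===== LEMMAS AND PROOFS =====

theorem pvD_iff (size : Int) :
    (256 ≤ PySem.Int.mod size 0x100000000 ∧ PySem.Int.mod size 0x100000000 < 512) ↔
      (PySem.Int.mod size 0x100000000) >>> (8 : Nat) = 1 := by
  have h0 : 0 ≤ PySem.Int.mod size 0x100000000 := PySem.Int.mod_nonneg size (by norm_num)
  have hc : (PySem.Int.mod size 0x100000000) >>> (8 : Nat)
      = (((PySem.Int.mod size 0x100000000).toNat >>> 8 : Nat) : Int) := by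
    rw [Int.natCast_shiftRight, Int.toNat_of_nonneg h0]
  rw [hc, Nat.shiftRight_eq_div_pow]
  norm_num
  omega

theorem pvBand_pow (m j : Nat) : (PySem.Int.band (m : Int) ((1 : Int) <<< j) ≠ 0) ↔ m.testBit j = true := by
  have h1 : ((1 : Int) <<< j) = ((2 ^ j : Nat) : Int) := by
    rw [Int.shiftLeft_eq]; push_cast; ring
  rw [h1, PySem.Int.band_natCast, Nat.and_two_pow]
  rcases h : m.testBit j <;> simp

theorem pvTestBit_of_bounds (m j : Nat) (h1 : 2 ^ j ≤ m) (h2 : m < 2 ^ (j + 1)) : m.testBit j = true := by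
  rw [Nat.testBit_eq_decide_div_mod_eq]
  have : m / 2 ^ j = 1 := Nat.div_eq_of_lt_le (by simpa using h1) (by rw [pow_succ] at h2; omega)
  simp [this]

theorem pvScan_eq (m : Nat) (hm : 1 ≤ m) :
    ∀ c : Nat, PySem.Int.bitLength (m : Int) - 1 ≤ c →
      pvScan (m : Int) c = max ((PySem.Int.bitLength (m : Int) : Int) - 1) 1 := by
  set L := PySem.Int.bitLength (m : Int) with hL
  have hlt : m < 2 ^ L := by simpa using PySem.Int.lt_two_pow_bitLength (m : Int)
  have hle : 2 ^ (L - 1) ≤ m := by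
    have := PySem.Int.two_pow_bitLength_le (m : Int) (by exact_mod_cast (by omega : (m : Int) ≠ 0))
    simpa using this
  have hL1 : 1 ≤ L := by
    by_contra h
    have : L = 0 := by omega
    rw [this] at hlt; simp at hlt; omega
  intro c
  induction c with
  | zero =>
    intro h
    have : L = 1 := by omega
    simp [pvScan, this]
  | succ c ih =>
    intro h
    by_cases hbit : m.testBit (c + 1) = true
    · have h2 : 2 ^ (c + 1) ≤ m := Nat.ge_two_pow_of_testBit hbit
      have hcL : c + 1 < L := by
        by_contra h'
        exact absurd hlt (not_lt.mpr (le_trans (Nat.pow_le_pow_right (by norm_num) (by omega)) h2))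
      have hLe : L = c + 2 := by omega
      rw [pvScan, if_pos ((pvBand_pow m (c + 1)).mpr hbit)]
      rw [hLe]; push_cast; omega
    · have hLc : L - 1 ≤ c := by
        by_contra h'
        have hLe : L - 1 = c + 1 := by omega
        apply hbit
        apply pvTestBit_of_bounds <;> rw [← hLe]
        · exact hle
        · have : L - 1 + 1 = L := by omega
          rw [this]; exact hlt
      rw [pvScan, if_neg (by simpa [pvBand_pow] using hbit)]
      exact ih hLc

set_option maxHeartbeats 3200000 in
theorem pvHighBit_eq (m g : Nat) (h1 : 2 ^ g ≤ m) (h2 : m < 2 ^ (g + 1)) (hg : g ≤ 15) :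
    pvHighBit (m : Int) = (g : Int) := by
  unfold pvHighBit
  simp only [ge_iff_le,
    show ((1 : Int) <<< (8 : Nat)) = 256 from by decide,
    show ((1 : Int) <<< (4 : Nat)) = 16 from by decide,
    show ((1 : Int) <<< (2 : Nat)) = 4 from by decide]
  interval_cases g <;>
    split_ifs <;>
    (try simp only [← Int.natCast_shiftRight, Nat.shiftRight_eq_div_pow] at *) <;>
    omega

-- ===== VERDICT (by name: the statement is the Claim_ definition above) =====
theorem compute_tree_index_spec : Claim_unchanged_compute_tree_index := by
  unfold Claim_unchanged_compute_tree_index Spec_compute_tree_index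
  intro size _ hD
  unfold D_compute_tree_index at hD
  rw [pvD_iff size] at hD
  unfold compute_tree_index compute_tree_index_alt rshift
  obtain ⟨m, hm⟩ : ∃ m : Nat, (PySem.Int.mod size 0x100000000) >>> (8 : Nat) = (m : Int) := by
    refine ⟨(PySem.Int.mod size 0x100000000).toNat >>> 8, ?_⟩
    rw [Int.natCast_shiftRight, Int.toNat_of_nonneg (PySem.Int.mod_nonneg size (by norm_num))]
  rw [hm] at hD
  simp only [hm]
  by_cases h0 : (m : Int) = 0
  · rw [if_pos h0, if_pos h0]
  · by_cases h1 : (m : Int) > 0xffff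
    · rw [if_neg h0, if_neg h0, if_pos h1, if_pos h1]
    · have hm1 : 1 ≤ m := by omega
      have hm2 : m ≤ 0xffff := by exact_mod_cast not_lt.mp h1
      have hmne1 : m ≠ 1 := by intro h; exact hD (by exact_mod_cast congrArg (Nat.cast : Nat → Int) h)
      have hm2' : 2 ≤ m := by omega
      set L := PySem.Int.bitLength (m : Int) with hL
      have hlt : m < 2 ^ L := by simpa using PySem.Int.lt_two_pow_bitLength (m : Int)
      have hle : 2 ^ (L - 1) ≤ m := by
        have := PySem.Int.two_pow_bitLength_le (m : Int) (by exact_mod_cast (by omega : (m : Int) ≠ 0))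
        simpa using this
      have hL2 : 2 ≤ L := by
        by_contra h
        have : L ≤ 1 := by omega
        have : (2:Nat) ^ L ≤ 2 ^ 1 := Nat.pow_le_pow_right (by norm_num) this
        omega
      have hg15 : L - 1 ≤ 15 := by
        by_contra h'
        have : (2:Nat) ^ 16 ≤ 2 ^ (L - 1) := Nat.pow_le_pow_right (by norm_num) (by omega)
        omega
      have hlt' : m < 2 ^ (L - 1 + 1) := by
        have : L - 1 + 1 = L := by omega
        rw [this]; exact hlt
      have hA : pvScan (m : Int) 31 = ((L - 1 : Nat) : Int) := by
        rw [pvScan_eq m hm1 31 (by omega)]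
        have : ((L : Int) - 1) = ((L - 1 : Nat) : Int) := by omega
        rw [this]
        exact max_eq_left (by exact_mod_cast (by omega : 1 ≤ L - 1))
      have hB : pvHighBit (m : Int) = ((L - 1 : Nat) : Int) := pvHighBit_eq m (L - 1) hle hlt' hg15
      rw [if_neg h0, if_neg h0, if_neg h1, if_neg h1]
      simp only [hA, hB]
      have h7 : (((L - 1 : Nat) : Int) + (8 - 1)).toNat = (((L - 1 : Nat) : Int) + 8 - 1).toNat := by omega
      rw [h7]

theorem compute_tree_index_changed : Claim_changed_compute_tree_index := by
  unfold Claim_changed_compute_tree_index; decide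

theorem compute_tree_index_tight : Claim_exact_compute_tree_index := by
  unfold Claim_exact_compute_tree_index
  intro size _ hD
  unfold D_compute_tree_index at hD
  rw [pvD_iff size] at hD
  unfold compute_tree_index compute_tree_index_alt rshift
  simp only [hD]
  rw [if_neg (by norm_num), if_neg (by norm_num), if_neg (by norm_num), if_neg (by norm_num)]
  have hscan : pvScan (1 : Int) 31 = 1 := by decide
  have hhb : pvHighBit (1 : Int) = 0 := by decide
  rw [hscan, hhb]
  rw [show ((1 : Int) <<< 1) = 2 from by decide, show ((0 : Int) <<< 1) = 0 from by decide]
  simp only [PySem.Int.band_one]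
  have ha := PySem.Int.mod_nonneg (size >>> ((1 : Int) + (8 - 1)).toNat) (by norm_num : (0:Int) < 2)
  have hb := PySem.Int.mod_lt (size >>> ((0 : Int) + 8 - 1).toNat) (by norm_num : (0:Int) < 2)
  intro h
  norm_num at h
  omega
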